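-- pv_equiv track=rewrite | github.com/nikfuzz/DataStructures_Algorithms | graphs/Batches.py | solve
-- ===== SOURCE A (Python) =====
-- class DSU:
--     def __init__(self, n, b):
--         self.parent = [i for i in range(n+1)]
--         self.size = [1 for i in range(n+1)]
--         self.vis = set()
--         self.str = b
--         self.str.insert(0,0)
--
--     def findSet(self, v):
--         if v == self.parent[v]:
--             return v
--         self.parent[v] = self.findSet(self.parent[v])
--         return self.parent[v]
--
--     def unionSet(self, u, v):
--         v = self.findSet(v)
--         u = self.findSet(u)
--         if v != u:
--             if self.size[v] < self.size[u]:
--                 v, u = u, v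
--             self.parent[u] = v
--             self.size[v] += self.size[u]
--             self.str[v] += self.str[u]
--             self.str[u] = 0
--
--     def findSum(self, v):
--         parent = self.findSet(v)
--         if parent in self.vis:
--             return 0
--         self.vis.add(parent)
--         return self.str[parent]
--
-- def solve(a, b, c, d):
--     dsu = DSU(a,b)
--     for i in range(len(c)):
--         dsu.unionSet(c[i][0],c[i][1])
--     batches = 0
--     for i in range(1,a+1):
--         batchSum = dsu.findSum(i)
--         if batchSum >= d:
--             batches += 1
--     return batches
-- ===== SOURCE B (Python) =====
-- def solve(a, b, c, d):
--     # NOTE: like A, mutates the caller's list b by inserting a 0 in front.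
--     b.insert(0, 0)            # weights now align with 1-based node ids; node 0 weighs 0
--     lab = list(range(a + 1))  # lab[x] = current component label of node x
--     tot = list(b)             # tot[r] = weight sum of the component labelled r
--     for e in c:
--         ru, rv = lab[e[0]], lab[e[1]]
--         if ru != rv:
--             lab = [rv if x == ru else x for x in lab]
--             tot[rv] += tot[ru]
--     count = 0
--     seen = set()
--     for i in range(1, a + 1):
--         r = lab[i]
--         if r in seen:
--             s = 0             # a repeated component contributes 0, exactly as A's findSum
--         else:
--             seen.add(r)
--             s = tot[r]
--         if s >= d:
--             count += 1
--     return count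
-- ===== Notes on version B (the rewrite author's own statement) =====
-- stated objective: simpler
-- what changed: A's recursive union-find (path compression + union by size + a vis set over roots) is replaced by a flat label array that is relabelled on each merging edge, with component sums kept per label; the counting pass then just reads labels, no find/recursion anywhere.
import Mathlib
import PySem

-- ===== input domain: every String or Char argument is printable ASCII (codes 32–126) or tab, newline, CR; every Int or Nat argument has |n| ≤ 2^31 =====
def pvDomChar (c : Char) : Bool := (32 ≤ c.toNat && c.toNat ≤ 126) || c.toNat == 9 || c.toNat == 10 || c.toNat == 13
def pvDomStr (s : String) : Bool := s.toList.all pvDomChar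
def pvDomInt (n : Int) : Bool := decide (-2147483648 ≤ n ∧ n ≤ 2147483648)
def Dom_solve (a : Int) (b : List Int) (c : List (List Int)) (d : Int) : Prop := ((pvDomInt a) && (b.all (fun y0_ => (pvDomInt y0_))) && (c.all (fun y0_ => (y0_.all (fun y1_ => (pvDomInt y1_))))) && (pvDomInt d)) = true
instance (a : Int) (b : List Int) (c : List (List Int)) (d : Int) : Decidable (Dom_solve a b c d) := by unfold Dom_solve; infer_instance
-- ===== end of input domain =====

-- B replaces A's recursive union-find (path compression + union by size) with a flat label array that
-- is relabelled on each merging edge — simpler, no recursion; like A it mutates the caller's b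
-- (b.insert(0,0)); the equivalence proved is about the return value.

-- ===== PORT A =====
-- findSet with path compression; the fuel argument only makes the Python recursion structural
-- (call sites pass parent.length + 1, which the invariant proves ample on Pre_ inputs).
def findSetA : Nat → List Int → Int → List Int × Int
  | 0, parent, v => (parent, v)
  | fuel+1, parent, v =>
    let p := PySem.List.pyGetD parent v 0
    if v = p then (parent, v)
    else
      let r := findSetA fuel parent p
      (PySem.List.pySetD r.1 v r.2, r.2)

-- DSU.unionSet on the state (parent, size, str)
def unionA (st : List Int × List Int × List Int) (u0 v0 : Int) : List Int × List Int × List Int :=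
  let parent := st.1
  let size := st.2.1
  let str := st.2.2
  let fv := findSetA (parent.length + 1) parent v0
  let fu := findSetA (fv.1.length + 1) fv.1 u0
  let v := fv.2
  let u := fu.2
  if v ≠ u then
    let p : Int × Int := if PySem.List.pyGetD size v 0 < PySem.List.pyGetD size u 0 then (u, v) else (v, u)
    let v' := p.1
    let u' := p.2
    (PySem.List.pySetD fu.1 u' v',
     PySem.List.pySetD size v' (PySem.List.pyGetD size v' 0 + PySem.List.pyGetD size u' 0),
     PySem.List.pySetD (PySem.List.pySetD str v' (PySem.List.pyGetD str v' 0 + PySem.List.pyGetD str u' 0)) u' 0)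
  else (fu.1, size, str)

def solve (a : Int) (b : List Int) (c : List (List Int)) (d : Int) : Int :=
  let parent0 := PySem.List.pyRange 0 (a+1) 1
  let size0 := (PySem.List.pyRange 0 (a+1) 1).map (fun _ => (1 : Int))
  let str0 : List Int := 0 :: b
  let st := c.foldl (fun st e => unionA st (PySem.List.pyGetD e 0 0) (PySem.List.pyGetD e 1 0))
      (parent0, size0, str0)
  let fin := (PySem.List.pyRange 1 (a+1) 1).foldl
      (fun (acc : List Int × PySem.Set Int × Int) i =>
        let f := findSetA (acc.1.length + 1) acc.1 i
        if PySem.Set.contains acc.2.1 f.2 then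
          (f.1, acc.2.1, acc.2.2 + (if (0 : Int) ≥ d then 1 else 0))
        else
          (f.1, PySem.Set.add acc.2.1 f.2,
           acc.2.2 + (if PySem.List.pyGetD st.2.2 f.2 0 ≥ d then 1 else 0)))
      (st.1, PySem.Set.empty, (0 : Int))
  fin.2.2

-- ===== PORT B =====
def solve_alt (a : Int) (b : List Int) (c : List (List Int)) (d : Int) : Int :=
  let w : List Int := 0 :: b
  let st := c.foldl (fun (st : List Int × List Int) e =>
      let ru := PySem.List.pyGetD st.1 (PySem.List.pyGetD e 0 0) 0
      let rv := PySem.List.pyGetD st.1 (PySem.List.pyGetD e 1 0) 0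
      if ru ≠ rv then
        (st.1.map (fun x => if x = ru then rv else x),
         PySem.List.pySetD st.2 rv (PySem.List.pyGetD st.2 rv 0 + PySem.List.pyGetD st.2 ru 0))
      else st)
    (PySem.List.pyRange 0 (a+1) 1, w)
  let fin := (PySem.List.pyRange 1 (a+1) 1).foldl
      (fun (acc : PySem.Set Int × Int) i =>
        let r := PySem.List.pyGetD st.1 i 0
        if PySem.Set.contains acc.1 r then
          (acc.1, acc.2 + (if (0 : Int) ≥ d then 1 else 0))
        else
          (PySem.Set.add acc.1 r, acc.2 + (if PySem.List.pyGetD st.2 r 0 ≥ d then 1 else 0)))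
      (PySem.Set.empty, (0 : Int))
  fin.2

-- ===== PRECONDITION & SPEC =====
-- Pre_ is A's natural domain, exactly where it returns: a fits the weight list (otherwise A hits
-- IndexError on str) and every edge names two node indices of the a+1 nodes, -(a+1)..a (Python's
-- negative indices wrap: id x < 0 means node a+1+x, in A and B alike); shorter edges or ids outside
-- that range raise IndexError; a < 0 is kept when c is empty (A returns 0 there).
def Pre_solve (a : Int) (b : List Int) (c : List (List Int)) (d : Int) : Prop :=
  (0 ≤ a ∨ c = []) ∧ a ≤ (b.length : Int) ∧
    ∀ e ∈ c, 2 ≤ e.length ∧ ∀ x ∈ e.take 2, -(a+1) ≤ x ∧ x ≤ a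
instance (a : Int) (b : List Int) (c : List (List Int)) (d : Int) : Decidable (Pre_solve a b c d) := by
  unfold Pre_solve; infer_instance
def pvWitness_solve : Int × List Int × List (List Int) × Int := (3, [5, 2, 4], [[1, 2]], 6)

def Spec_solve (a : Int) (b : List Int) (c : List (List Int)) (d : Int) (out : Int) : Prop := out = solve_alt a b c d
instance (a : Int) (b : List Int) (c : List (List Int)) (d : Int) (out : Int) : Decidable (Spec_solve a b c d out) := by unfold Spec_solve; infer_instance

-- ===== CLAIM (what is proved, stated in full; the proofs are below) =====
def Claim_equal_solve : Prop := ∀ (a : Int) (b : List Int) (c : List (List Int)) (d : Int), Dom_solve a b c d → Pre_solve a b c d → Spec_solve a b c d (solve a b c d)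

-- ===== LEMMAS AND PROOFS =====
-- ---------- small accessor infrastructure ----------
-- G l v = l[v] for a nonnegative in-range index (Python list read), Nd a v = v is a node id
def G (l : List Int) (v : Int) : Int := l.getD v.toNat 0
def Nd (a v : Int) : Prop := 0 ≤ v ∧ v ≤ a
def rng (a : Int) : List Int := PySem.List.pyRange 0 (a+1) 1
-- summed weight / cardinality of the class {y | f y = r} of labelling f
def gSum (a : Int) (w : List Int) (f : Int → Int) (r : Int) : Int :=
  (((rng a).filter (fun y => f y = r)).map (fun y => G w y)).sum
def cCard (a : Int) (f : Int → Int) (r : Int) : Nat :=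
  ((rng a).filter (fun y => f y = r)).length

lemma pyGetD_eq_G (l : List Int) (v : Int) (hv : 0 ≤ v) : PySem.List.pyGetD l v 0 = G l v := by
  have h : v = ((v.toNat : Nat) : Int) := by omega
  rw [h, PySem.List.pyGetD_natCast]; rfl

lemma pySetD_eq_set (l : List Int) (v x : Int) (hv : 0 ≤ v) :
    PySem.List.pySetD l v x = l.set v.toNat x :=
  PySem.List.pySetD_of_nonneg l x hv

lemma G_set_self (l : List Int) (v x : Int) (h : v.toNat < l.length) :
    G (l.set v.toNat x) v = x := by
  simp [G, List.getD_eq_getElem?_getD, List.getElem?_set, h]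

lemma G_set_ne (l : List Int) (u v x : Int) (hu : 0 ≤ u) (hv : 0 ≤ v) (hne : v ≠ u) :
    G (l.set u.toNat x) v = G l v := by
  have : u.toNat ≠ v.toNat := by omega
  simp [G, List.getD_eq_getElem?_getD, List.getElem?_set, this]

lemma G_map (l : List Int) (f : Int → Int) (v : Int) (h : v.toNat < l.length) :
    G (l.map f) v = f (G l v) := by
  simp [G, List.getD_eq_getElem?_getD, List.getElem?_map, h, List.getElem?_eq_getElem]

lemma mem_rng (a x : Int) : x ∈ rng a ↔ Nd a x := by
  rw [rng, PySem.List.mem_pyRange_one]; unfold Nd; omega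

lemma length_rng (a : Int) : (rng a).length = (a+1).toNat := by
  simp [rng, PySem.List.length_pyRange_one]

lemma nodup_rng (a : Int) : (rng a).Nodup := PySem.List.nodup_pyRange_one 0 (a+1)

lemma G_rng (a v : Int) (h : Nd a v) : G (rng a) v = v := by
  obtain ⟨h1, h2⟩ := h
  have hlt : v.toNat < (PySem.List.pyRange 0 (a+1) 1).length := by
    rw [PySem.List.length_pyRange_one]; omega
  rw [G, rng, List.getD_eq_getElem _ _ hlt, PySem.List.getElem_pyRange_one]
  omega

lemma cCard_le (a : Int) (f : Int → Int) (r : Int) : cCard a f r ≤ (a+1).toNat := by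
  calc cCard a f r ≤ (rng a).length := List.length_filter_le _ _
  _ = (a+1).toNat := length_rng a

-- disjoint split of a filtered sum / count
lemma filter_or_sum (l : List Int) (p q : Int → Prop) [DecidablePred p] [DecidablePred q]
    (f : Int → Int) (hd : ∀ x ∈ l, ¬(p x ∧ q x)) :
    ((l.filter (fun x => p x ∨ q x)).map f).sum
      = ((l.filter (fun x => p x)).map f).sum + ((l.filter (fun x => q x)).map f).sum := by
  induction l with
  | nil => simp
  | cons h t ih =>
    have ih' := ih (fun x hx => hd x (List.mem_cons_of_mem _ hx))
    simp only [Bool.decide_or] at ih'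
    by_cases hp : p h
    · have hq : ¬ q h := fun hq => hd h List.mem_cons_self ⟨hp, hq⟩
      simp [hp, hq, Bool.decide_or, ih']; ring
    · by_cases hq : q h
      · simp [hp, hq, Bool.decide_or, ih']; ring
      · simp [hp, hq, Bool.decide_or, ih']

lemma filter_or_len (l : List Int) (p q : Int → Prop) [DecidablePred p] [DecidablePred q]
    (hd : ∀ x ∈ l, ¬(p x ∧ q x)) :
    (l.filter (fun x => p x ∨ q x)).length
      = (l.filter (fun x => p x)).length + (l.filter (fun x => q x)).length := by
  induction l with
  | nil => simp
  | cons h t ih =>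
    have ih' := ih (fun x hx => hd x (List.mem_cons_of_mem _ hx))
    simp only [Bool.decide_or] at ih'
    by_cases hp : p h
    · have hq : ¬ q h := fun hq => hd h List.mem_cons_self ⟨hp, hq⟩
      simp [hp, hq, Bool.decide_or, ih']; omega
    · by_cases hq : q h
      · simp [hp, hq, Bool.decide_or, ih']; omega
      · simp [hp, hq, Bool.decide_or, ih']

lemma filter_eq_singleton (l : List Int) (r : Int) (hn : l.Nodup) (hr : r ∈ l) :
    l.filter (fun x => x = r) = [r] := by
  induction l with
  | nil => simp at hr
  | cons y t ih =>
    rcases List.mem_cons.mp hr with h1 | h1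
    · have hnotin : y ∉ t := (List.nodup_cons.mp hn).1
      subst h1
      have hnil : t.filter (fun x => decide (x = r)) = [] := by
        apply List.filter_eq_nil_iff.mpr
        intro x hx
        simp only [decide_eq_true_eq]
        intro hxy; exact hnotin (hxy ▸ hx)
      simp [List.filter_cons, hnil]
    · have hh : ¬ (y = r) := by rintro rfl; exact (List.nodup_cons.mp hn).1 h1
      have ih' := ih (List.nodup_cons.mp hn).2 h1
      simp [List.filter_cons, hh, ih']

-- ---------- the DSU invariant (abstract roots ρ, depth measure dpt) ----------
structure InvA (a : Int) (w parent str : List Int) (ρ : Int → Int) (dpt : Int → Nat) : Prop where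
  plen : parent.length = (a+1).toNat
  slen : str.length = w.length
  wlen : (a+1).toNat ≤ w.length
  prng : ∀ v, Nd a v → Nd a (G parent v)
  rfix : ∀ v, Nd a v → G parent v = v → ρ v = v
  rstep : ∀ v, Nd a v → G parent v ≠ v → ρ (G parent v) = ρ v ∧ dpt (G parent v) < dpt v
  rroot : ∀ v, Nd a v → Nd a (ρ v) ∧ G parent (ρ v) = ρ v
  dbnd : ∀ v, Nd a v → dpt v < cCard a ρ (ρ v)
  ssum : ∀ r, Nd a r → G parent r = r → G str r = gSum a w ρ r

lemma InvA.ρ_idem {a : Int} {w parent str : List Int} {ρ : Int → Int} {dpt : Int → Nat}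
    (hI : InvA a w parent str ρ dpt) (v : Int) (hv : Nd a v) : ρ (ρ v) = ρ v :=
  hI.rfix (ρ v) (hI.rroot v hv).1 (hI.rroot v hv).2

lemma InvA.ρ_ne {a : Int} {w parent str : List Int} {ρ : Int → Int} {dpt : Int → Nat}
    (hI : InvA a w parent str ρ dpt) (v : Int) (hv : Nd a v) (h : G parent v ≠ v) : ρ v ≠ v := by
  intro he; exact h (by rw [← he]; exact (hI.rroot v hv).2)

lemma InvA.dpt_root_lt {a : Int} {w parent str : List Int} {ρ : Int → Int} {dpt : Int → Nat}
    (hI : InvA a w parent str ρ dpt) : ∀ n (v : Int), dpt v = n → Nd a v → G parent v ≠ v →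
    dpt (ρ v) < dpt v := by
  intro n
  induction n using Nat.strong_induction_on with
  | _ n ih =>
    intro v hn hv hnr
    obtain ⟨hs1, hs2⟩ := hI.rstep v hv hnr
    by_cases hr : G parent (G parent v) = G parent v
    · have : ρ (G parent v) = G parent v := hI.rfix _ (hI.prng v hv) hr
      rw [← hs1, this]; exact hs2
    · have := ih (dpt (G parent v)) (by omega) (G parent v) rfl (hI.prng v hv) hr
      rw [← hs1]; omega

-- findSet: returns ρ v, preserves the invariant (path compression) and the set of roots
lemma findA_spec (a : Int) (w str : List Int) (ρ : Int → Int) (dpt : Int → Nat) :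
    ∀ (fuel : Nat) (parent : List Int) (v : Int), InvA a w parent str ρ dpt → Nd a v →
      dpt v < fuel →
      (findSetA fuel parent v).2 = ρ v ∧
      InvA a w (findSetA fuel parent v).1 str ρ dpt ∧
      (∀ x, Nd a x → ((G (findSetA fuel parent v).1 x = x) ↔ (G parent x = x))) := by
  intro fuel
  induction fuel with
  | zero => intro parent v hI hv hf; omega
  | succ fuel ih =>
    intro parent v hI hv hf
    simp only [findSetA]
    rw [pyGetD_eq_G parent v hv.1]
    by_cases hroot : v = G parent v
    · simp only [if_pos hroot]
      exact ⟨(hI.rfix v hv hroot.symm).symm ▸ rfl, hI, fun x _ => by trivial⟩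
    · simp only [if_neg hroot]
      have hpNd := hI.prng v hv
      have hGne : G parent v ≠ v := fun h => hroot h.symm
      have hstep := hI.rstep v hv hGne
      have hf' : dpt (G parent v) < fuel := by omega
      obtain ⟨h2, hI2, hiff⟩ := ih parent (G parent v) hI hpNd hf'
      rw [h2, hstep.1]
      rw [pySetD_eq_set _ _ _ hv.1]
      set r1 := (findSetA fuel parent (G parent v)).1 with hr1
      have hvlt : v.toNat < r1.length := by
        rw [hI2.plen]; obtain ⟨h1, h2'⟩ := hv; omega
      have hρv_ne : ρ v ≠ v := hI.ρ_ne v hv hGne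
      have hself : G (r1.set v.toNat (ρ v)) v = ρ v := G_set_self r1 v (ρ v) hvlt
      have hother : ∀ x, Nd a x → x ≠ v → G (r1.set v.toNat (ρ v)) x = G r1 x :=
        fun x hx hxv => G_set_ne r1 v x (ρ v) hv.1 hx.1 hxv
      have hρx_ne_v : ∀ x, Nd a x → ρ x ≠ v := by
        intro x hx h
        exact hGne (h ▸ (hI.rroot x hx).2)
      refine ⟨rfl, ?_, ?_⟩
      · refine ⟨by simp [hI2.plen], hI2.slen, hI2.wlen, ?_, ?_, ?_, ?_, hI2.dbnd, ?_⟩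
        · intro x hx
          by_cases hxv : x = v
          · subst hxv; rw [hself]; exact (hI.rroot x hx).1
          · rw [hother x hx hxv]; exact hI2.prng x hx
        · intro x hx hfix
          by_cases hxv : x = v
          · subst hxv; rw [hself] at hfix; exact absurd hfix hρv_ne
          · rw [hother x hx hxv] at hfix; exact hI2.rfix x hx hfix
        · intro x hx hnr
          by_cases hxv : x = v
          · subst hxv
            rw [hself]
            exact ⟨hI.ρ_idem x hx, hI.dpt_root_lt (dpt x) x rfl hx hGne⟩
          · rw [hother x hx hxv] at hnr ⊢; exact hI2.rstep x hx hnr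
        · intro x hx
          refine ⟨(hI.rroot x hx).1, ?_⟩
          rw [hother (ρ x) (hI.rroot x hx).1 (hρx_ne_v x hx)]
          exact (hI2.rroot x hx).2
        · intro rr hrr hfix
          by_cases hxv : rr = v
          · subst hxv; rw [hself] at hfix; exact absurd hfix.symm hρv_ne.symm
          · rw [hother rr hrr hxv] at hfix; exact hI2.ssum rr hrr hfix
      · intro x hx
        by_cases hxv : x = v
        · subst hxv
          rw [hself]
          constructor
          · intro h; exact absurd h hρv_ne
          · intro h; exact absurd h.symm hroot
        · rw [hother x hx hxv]; exact hiff x hx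


-- ---------- Python negative-index wraparound on the node arrays ----------
def wrapN (a v : Int) : Int := if v < 0 then v + (a + 1) else v

lemma wrapN_Nd (a v : Int) (h1 : -(a+1) ≤ v) (h2 : v ≤ a) : Nd a (wrapN a v) := by
  unfold wrapN Nd
  by_cases hv : v < 0
  · rw [if_pos hv]; omega
  · rw [if_neg hv]; omega

lemma pyGetD_wrapN (a : Int) (l : List Int) (v : Int) (hl : l.length = (a+1).toNat)
    (h1 : -(a+1) ≤ v) (h2 : v ≤ a) : PySem.List.pyGetD l v 0 = G l (wrapN a v) := by
  by_cases hv : v < 0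
  · have hk : v = -(((-v).toNat : Nat) : Int) := by omega
    rw [hk, PySem.List.pyGetD_neg_natCast l (-v).toNat 0 (by omega) (by omega)]
    unfold wrapN G
    rw [if_pos (by omega : -(((-v).toNat : Nat) : Int) < 0)]
    rw [List.getD_eq_getElem _ _ (by omega)]
    congr 1
    omega
  · unfold wrapN
    rw [if_neg hv]
    exact pyGetD_eq_G l v (by omega)

lemma pySetD_wrapN (a : Int) (l : List Int) (v x : Int) (hl : l.length = (a+1).toNat)
    (h1 : -(a+1) ≤ v) (h2 : v ≤ a) :
    PySem.List.pySetD l v x = l.set (wrapN a v).toNat x := by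
  by_cases hv : v < 0
  · have hnotle : ¬ (0 ≤ v) := by omega
    have hge : -((l.length : Nat) : Int) ≤ v := by omega
    simp only [PySem.List.pySetD, PySem.List.pySet?, PySem.List.pyIdx?,
      if_neg hnotle, if_pos hge, Option.map_some, Option.getD_some]
    congr 1
    unfold wrapN
    rw [if_pos hv]
    omega
  · unfold wrapN
    rw [if_neg hv]
    exact pySetD_eq_set l v x (by omega)

-- pointing any node at its own class root preserves the invariant and the root set
lemma set_root_preserve (a : Int) (w parent str : List Int) (ρ : Int → Int) (dpt : Int → Nat)
    (hI : InvA a w parent str ρ dpt) (x : Int) (hx : Nd a x) :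
    InvA a w (parent.set x.toNat (ρ x)) str ρ dpt ∧
    (∀ z, Nd a z → (G (parent.set x.toNat (ρ x)) z = z ↔ G parent z = z)) := by
  have hxlt : x.toNat < parent.length := by rw [hI.plen]; obtain ⟨h1, h2⟩ := hx; omega
  have hacc : ∀ z : Int, Nd a z →
      G (parent.set x.toNat (ρ x)) z = if z = x then ρ x else G parent z := by
    intro z hz
    by_cases hzx : z = x
    · rw [if_pos hzx, hzx]; exact G_set_self parent x (ρ x) hxlt
    · rw [if_neg hzx]; exact G_set_ne parent x z (ρ x) hx.1 hz.1 hzx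
  have hρidem := hI.ρ_idem x hx
  have hrootiff : ∀ z, Nd a z → (G (parent.set x.toNat (ρ x)) z = z ↔ G parent z = z) := by
    intro z hz
    rw [hacc z hz]
    by_cases hzx : z = x
    · rw [if_pos hzx, hzx]
      constructor
      · intro h
        rw [← h]; exact (hI.rroot x hx).2
      · intro h
        exact hI.rfix x hx h
    · rw [if_neg hzx]
  refine ⟨⟨by simp [hI.plen], hI.slen, hI.wlen, ?_, ?_, ?_, ?_, hI.dbnd, ?_⟩, hrootiff⟩
  · intro z hz
    rw [hacc z hz]
    by_cases hzx : z = x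
    · rw [if_pos hzx]; exact (hI.rroot x hx).1
    · rw [if_neg hzx]; exact hI.prng z hz
  · intro z hz hfix
    rw [hacc z hz] at hfix
    by_cases hzx : z = x
    · rw [if_pos hzx] at hfix
      rw [hzx] at hfix ⊢
      exact hfix
    · rw [if_neg hzx] at hfix; exact hI.rfix z hz hfix
  · intro z hz hnr
    rw [hacc z hz] at hnr ⊢
    by_cases hzx : z = x
    · rw [if_pos hzx] at hnr ⊢
      rw [hzx] at hnr ⊢
      have hxnr : G parent x ≠ x := by
        intro h; exact hnr ((hI.rfix x hx h).symm ▸ rfl)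
      exact ⟨hρidem, hI.dpt_root_lt (dpt x) x rfl hx hxnr⟩
    · rw [if_neg hzx] at hnr ⊢
      exact hI.rstep z hz hnr
  · intro z hz
    refine ⟨(hI.rroot z hz).1, ?_⟩
    rw [hacc (ρ z) (hI.rroot z hz).1]
    by_cases hzx : ρ z = x
    · rw [if_pos hzx, hzx]
      rw [← hzx, hI.ρ_idem z hz, hzx]
    · rw [if_neg hzx]; exact (hI.rroot z hz).2
  · intro r hr hfix
    rw [hacc r hr] at hfix
    by_cases hzx : r = x
    · rw [if_pos hzx] at hfix
      rw [hzx] at hfix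
      have : G parent r = r := by rw [hzx]; exact hfix ▸ (hI.rroot x hx).2
      exact hI.ssum r hr this
    · rw [if_neg hzx] at hfix
      exact hI.ssum r hr hfix

-- findSet called on a possibly negative (wrapping) node id
lemma findAny_spec (a : Int) (w str : List Int) (ρ : Int → Int) (dpt : Int → Nat)
    (parent : List Int) (v : Int) (hI : InvA a w parent str ρ dpt)
    (h1 : -(a+1) ≤ v) (h2 : v ≤ a) :
    (findSetA (parent.length + 1) parent v).2 = ρ (wrapN a v) ∧
    InvA a w (findSetA (parent.length + 1) parent v).1 str ρ dpt ∧
    (∀ x, Nd a x → ((G (findSetA (parent.length + 1) parent v).1 x = x) ↔ (G parent x = x))) := by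
  have hfuel : ∀ z, Nd a z → dpt z < parent.length := by
    intro z hz
    have hb := hI.dbnd z hz
    have hc := cCard_le a ρ (ρ z)
    rw [hI.plen]; omega
  by_cases hv : v < 0
  · have hv' : Nd a (wrapN a v) := wrapN_Nd a v h1 h2
    simp only [findSetA]
    rw [pyGetD_wrapN a parent v hI.plen h1 h2]
    have hpNd : Nd a (G parent (wrapN a v)) := hI.prng (wrapN a v) hv'
    have hvne : v ≠ G parent (wrapN a v) := by obtain ⟨hh1, hh2⟩ := hpNd; omega
    rw [if_neg hvne]
    have hρp : ρ (G parent (wrapN a v)) = ρ (wrapN a v) := by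
      by_cases hr : G parent (wrapN a v) = wrapN a v
      · rw [hr]
      · exact (hI.rstep (wrapN a v) hv' hr).1
    obtain ⟨he, hI1, hiff1⟩ := findA_spec a w str ρ dpt parent.length parent
      (G parent (wrapN a v)) hI hpNd (hfuel _ hpNd)
    rw [he, hρp]
    rw [pySetD_wrapN a _ v (ρ (wrapN a v)) hI1.plen h1 h2]
    have hρwr : ρ (ρ (wrapN a v)) = ρ (wrapN a v) := hI.ρ_idem (wrapN a v) hv'
    have hset := set_root_preserve a w (findSetA parent.length parent (G parent (wrapN a v))).1
      str ρ dpt hI1 (wrapN a v) hv'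
    refine ⟨rfl, ?_, ?_⟩
    · exact hset.1
    · intro x hx
      exact (hset.2 x hx).trans (hiff1 x hx)
  · have hv' : Nd a v := ⟨by omega, h2⟩
    have hwr : wrapN a v = v := by unfold wrapN; rw [if_neg hv]
    rw [hwr]
    exact findA_spec a w str ρ dpt (parent.length + 1) parent v hI hv' (by have := hfuel v hv'; omega)

lemma filter_congr_dec (l : List Int) (p q : Int → Prop) [DecidablePred p] [DecidablePred q]
    (h : ∀ x ∈ l, p x ↔ q x) :
    l.filter (fun x => p x) = l.filter (fun x => q x) :=
  List.filter_congr (fun x hx => decide_eq_decide.mpr (h x hx))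

-- merging the root L into the root W: the new abstract root map and depth measure
lemma union_core (a : Int) (w parent str : List Int) (ρ : Int → Int) (dpt : Int → Nat)
    (hI : InvA a w parent str ρ dpt) (W L : Int) (hW : Nd a W) (hL : Nd a L)
    (hWr : ρ W = W) (hLr : ρ L = L) (hWL : W ≠ L) :
    ∃ ρ' dpt',
      InvA a w (parent.set L.toNat W)
        ((str.set W.toNat (G str W + G str L)).set L.toNat 0) ρ' dpt' ∧
      (∀ x, ρ' x = if ρ x = W ∨ ρ x = L then W else ρ x) := by
  refine ⟨fun x => if ρ x = W ∨ ρ x = L then W else ρ x,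
          fun x => if ρ x = L then dpt x + dpt W + 1 else dpt x, ?_, fun x => rfl⟩
  have hWroot : G parent W = W := hWr ▸ (hI.rroot W hW).2
  have hLroot : G parent L = L := hLr ▸ (hI.rroot L hL).2
  have hWslt : W.toNat < str.length := by
    rw [hI.slen]; have := hI.wlen; obtain ⟨x1, x2⟩ := hW; omega
  have hPacc : ∀ x : Int, Nd a x → G (parent.set L.toNat W) x = if x = L then W else G parent x := by
    intro x hx
    by_cases hxL : x = L
    · rw [if_pos hxL, hxL]
      exact G_set_self parent L W (by rw [hI.plen]; obtain ⟨x1, x2⟩ := hL; omega)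
    · rw [if_neg hxL]
      exact G_set_ne parent L x W hL.1 hx.1 hxL
  have hρ'W : ∀ y : Int, ((if ρ y = W ∨ ρ y = L then W else ρ y) = W) ↔ (ρ y = W ∨ ρ y = L) := by
    intro y
    by_cases hin : ρ y = W ∨ ρ y = L
    · rw [if_pos hin]; exact ⟨fun _ => hin, fun _ => rfl⟩
    · rw [if_neg hin]
      constructor
      · intro h; exact absurd (Or.inl h) hin
      · intro h; exact absurd h hin
  have hρ'_off : ∀ r : Int, r ≠ W → r ≠ L → ∀ y : Int,
      ((if ρ y = W ∨ ρ y = L then W else ρ y) = r) ↔ (ρ y = r) := by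
    intro r hrW hrL y
    by_cases hin : ρ y = W ∨ ρ y = L
    · rw [if_pos hin]
      constructor
      · intro h; exact absurd h.symm hrW
      · intro h; rcases hin with h1 | h1
        · exact absurd (by omega : r = W) hrW
        · exact absurd (by omega : r = L) hrL
    · rw [if_neg hin]
  have hdisj : ∀ y ∈ rng a, ¬(ρ y = W ∧ ρ y = L) := by
    intro y _ hy; exact hWL (by omega)
  have hcardW : cCard a (fun x => if ρ x = W ∨ ρ x = L then W else ρ x) W
      = cCard a ρ W + cCard a ρ L := by
    unfold cCard
    rw [filter_congr_dec _ _ _ (fun y _ => hρ'W y)]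
    exact filter_or_len (rng a) _ _ hdisj
  have hcard_off : ∀ r : Int, r ≠ W → r ≠ L →
      cCard a (fun x => if ρ x = W ∨ ρ x = L then W else ρ x) r = cCard a ρ r := by
    intro r h1 h2
    unfold cCard
    rw [filter_congr_dec _ _ _ (fun y _ => hρ'_off r h1 h2 y)]
  refine ⟨?_, ?_, hI.wlen, ?_, ?_, ?_, ?_, ?_, ?_⟩
  · simp [hI.plen]
  · simp [hI.slen]
  · -- prng
    intro x hx
    rw [hPacc x hx]
    by_cases hxL : x = L
    · rw [if_pos hxL]; exact hW
    · rw [if_neg hxL]; exact hI.prng x hx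
  · -- rfix
    intro x hx hfix
    rw [hPacc x hx] at hfix
    by_cases hxL : x = L
    · rw [if_pos hxL] at hfix; exact absurd hfix (by omega)
    · rw [if_neg hxL] at hfix
      have hρx : ρ x = x := hI.rfix x hx hfix
      by_cases hin : ρ x = W ∨ ρ x = L
      · rw [if_pos hin]
        rcases hin with h1 | h1
        · omega
        · exact absurd (by omega : x = L) hxL
      · rw [if_neg hin]; exact hρx
  · -- rstep
    intro x hx hnr
    rw [hPacc x hx] at hnr ⊢
    by_cases hxL : x = L
    · rw [if_pos hxL] at hnr ⊢
      have hx1 : ρ x = L := by rw [hxL]; exact hLr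
      have hWin : ρ W = W ∨ ρ W = L := Or.inl hWr
      have hxin : ρ x = W ∨ ρ x = L := Or.inr hx1
      have hWnotL : ρ W ≠ L := by rw [hWr]; exact hWL
      constructor
      · rw [if_pos hWin, if_pos hxin]
      · rw [if_neg hWnotL, if_pos hx1]; omega
    · rw [if_neg hxL] at hnr ⊢
      obtain ⟨hs1, hs2⟩ := hI.rstep x hx hnr
      rw [hs1]
      refine ⟨rfl, ?_⟩
      by_cases hin : ρ x = L
      · rw [if_pos hin, if_pos hin]; omega
      · rw [if_neg hin, if_neg hin]; omega
  · -- rroot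
    intro x hx
    by_cases hin : ρ x = W ∨ ρ x = L
    · rw [if_pos hin]
      refine ⟨hW, ?_⟩
      rw [hPacc W hW, if_neg hWL]
      exact hWroot
    · rw [if_neg hin]
      push_neg at hin
      refine ⟨(hI.rroot x hx).1, ?_⟩
      rw [hPacc (ρ x) (hI.rroot x hx).1, if_neg hin.2]
      exact (hI.rroot x hx).2
  · -- dbnd
    intro x hx
    by_cases hin : ρ x = W ∨ ρ x = L
    · rw [if_pos hin, hcardW]
      have hbW : dpt W < cCard a ρ W := by have h := hI.dbnd W hW; rw [hWr] at h; exact h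
      have hbx := hI.dbnd x hx
      rcases hin with h1 | h1
      · have hxnL : ρ x ≠ L := by rw [h1]; exact hWL
        rw [if_neg hxnL]
        rw [h1] at hbx; omega
      · rw [if_pos h1]
        rw [h1] at hbx; omega
    · push_neg at hin
      rw [if_neg (not_or.mpr hin), hcard_off (ρ x) hin.1 hin.2, if_neg hin.2]
      exact hI.dbnd x hx
  · -- ssum
    intro r hr hfix
    rw [hPacc r hr] at hfix
    by_cases hrL : r = L
    · rw [if_pos hrL] at hfix; exact absurd hfix (by omega)
    · rw [if_neg hrL] at hfix
      have hroot : G parent r = r := hfix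
      by_cases hrW : r = W
      · rw [G_set_ne _ L r 0 hL.1 hr.1 hrL, hrW]
        rw [G_set_self str W _ hWslt]
        rw [hI.ssum W hW hWroot, hI.ssum L hL hLroot]
        unfold gSum
        rw [filter_congr_dec _ _ _ (fun y _ => hρ'W y)]
        rw [filter_or_sum (rng a) _ _ _ hdisj]
      · rw [G_set_ne _ L r 0 hL.1 hr.1 hrL]
        rw [G_set_ne _ W r _ hW.1 hr.1 hrW]
        rw [hI.ssum r hr hroot]
        unfold gSum
        rw [filter_congr_dec _ _ _ (fun y _ => hρ'_off r hrW hrL y)]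

-- unionSet: merges the classes of u0 and v0 (whichever direction the sizes pick);
-- negative ids wrap to node a+1+id, like Python's list indexing
lemma unionA_spec (a : Int) (w : List Int) (ρ : Int → Int) (dpt : Int → Nat)
    (parent size str : List Int) (u0 v0 : Int)
    (hI : InvA a w parent str ρ dpt)
    (hu1 : -(a+1) ≤ u0) (hu2 : u0 ≤ a) (hv1 : -(a+1) ≤ v0) (hv2 : v0 ≤ a) :
    ∃ ρ' dpt' rN, (rN = ρ (wrapN a u0) ∨ rN = ρ (wrapN a v0)) ∧
      InvA a w (unionA (parent, size, str) u0 v0).1 (unionA (parent, size, str) u0 v0).2.2 ρ' dpt' ∧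
      (∀ x, ρ' x = if ρ x = ρ (wrapN a u0) ∨ ρ x = ρ (wrapN a v0) then rN else ρ x) := by
  have hu : Nd a (wrapN a u0) := wrapN_Nd a u0 hu1 hu2
  have hv : Nd a (wrapN a v0) := wrapN_Nd a v0 hv1 hv2
  obtain ⟨he1, hI1, _⟩ := findAny_spec a w str ρ dpt parent v0 hI hv1 hv2
  set p1 := (findSetA (parent.length+1) parent v0).1 with hp1
  obtain ⟨he2, hI2, _⟩ := findAny_spec a w str ρ dpt p1 u0 hI1 hu1 hu2
  set p2 := (findSetA (p1.length+1) p1 u0).1 with hp2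
  have hru : Nd a (ρ (wrapN a u0)) := (hI.rroot _ hu).1
  have hrv : Nd a (ρ (wrapN a v0)) := (hI.rroot _ hv).1
  have hrur : ρ (ρ (wrapN a u0)) = ρ (wrapN a u0) := hI.ρ_idem _ hu
  have hrvr : ρ (ρ (wrapN a v0)) = ρ (wrapN a v0) := hI.ρ_idem _ hv
  simp only [unionA]
  rw [← hp1, he1, ← hp2, he2]
  by_cases hne : ρ (wrapN a v0) ≠ ρ (wrapN a u0)
  · rw [if_pos hne]
    by_cases hsz : PySem.List.pyGetD size (ρ (wrapN a v0)) 0 < PySem.List.pyGetD size (ρ (wrapN a u0)) 0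
    · rw [if_pos hsz]
      simp only
      rw [pySetD_eq_set _ _ _ hrv.1, pySetD_eq_set _ _ _ hru.1,
          pyGetD_eq_G _ _ hru.1, pyGetD_eq_G _ _ hrv.1, pySetD_eq_set _ _ _ hrv.1]
      obtain ⟨ρ', dpt', hInv, hform⟩ :=
        union_core a w p2 str ρ dpt hI2 (ρ (wrapN a u0)) (ρ (wrapN a v0)) hru hrv hrur hrvr
          (fun h => hne h.symm)
      refine ⟨ρ', dpt', ρ (wrapN a u0), Or.inl rfl, hInv, ?_⟩
      intro x
      exact hform x
    · rw [if_neg hsz]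
      simp only
      rw [pySetD_eq_set _ _ _ hru.1, pySetD_eq_set _ _ _ hrv.1,
          pyGetD_eq_G _ _ hrv.1, pyGetD_eq_G _ _ hru.1, pySetD_eq_set _ _ _ hru.1]
      obtain ⟨ρ', dpt', hInv, hform⟩ :=
        union_core a w p2 str ρ dpt hI2 (ρ (wrapN a v0)) (ρ (wrapN a u0)) hrv hru hrvr hrur hne
      refine ⟨ρ', dpt', ρ (wrapN a v0), Or.inr rfl, hInv, ?_⟩
      intro x
      rw [hform x]
      exact if_congr (or_comm) rfl rfl
  · rw [if_neg hne]
    push_neg at hne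
    refine ⟨ρ, dpt, ρ (wrapN a u0), Or.inl rfl, hI2, ?_⟩
    intro x
    by_cases hin : ρ x = ρ (wrapN a u0) ∨ ρ x = ρ (wrapN a v0)
    · rw [if_pos hin]
      rcases hin with h1 | h1
      · exact h1
      · rw [h1, hne]
    · rw [if_neg hin]

-- ---------- the label-array invariant for B ----------
structure InvB (a : Int) (w lab tot : List Int) : Prop where
  llen : lab.length = (a+1).toNat
  tlen : tot.length = w.length
  wlen : (a+1).toNat ≤ w.length
  lrng : ∀ x, Nd a x → Nd a (G lab x)
  tsum : ∀ x, Nd a x → G tot (G lab x) = gSum a w (fun y => G lab y) (G lab x)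

lemma stepB_merge (a : Int) (w lab tot : List Int) (u0 v0 : Int)
    (hB : InvB a w lab tot) (hu : Nd a u0) (hv : Nd a v0)
    (hne : G lab u0 ≠ G lab v0) :
    InvB a w (lab.map (fun x => if x = G lab u0 then G lab v0 else x))
      (tot.set (G lab v0).toNat (G tot (G lab v0) + G tot (G lab u0))) ∧
    (∀ x, Nd a x → G (lab.map (fun x => if x = G lab u0 then G lab v0 else x)) x
        = if G lab x = G lab u0 then G lab v0 else G lab x) := by
  set ru := G lab u0 with hru
  set rv := G lab v0 with hrv
  have hruNd : Nd a ru := hB.lrng u0 hu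
  have hrvNd : Nd a rv := hB.lrng v0 hv
  have hmap : ∀ x : Int, Nd a x →
      G (lab.map (fun z => if z = ru then rv else z)) x = if G lab x = ru then rv else G lab x := by
    intro x hx
    rw [G_map lab _ x (by rw [hB.llen]; obtain ⟨x1, x2⟩ := hx; omega)]
  have hrvlt : rv.toNat < tot.length := by
    rw [hB.tlen]; have := hB.wlen; obtain ⟨x1, x2⟩ := hrvNd; omega
  have hfrv : ∀ z : Int, ((if z = ru then rv else z) = rv) ↔ (z = ru ∨ z = rv) := by
    intro z
    by_cases hz : z = ru
    · rw [if_pos hz]; exact ⟨fun _ => Or.inl hz, fun _ => rfl⟩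
    · rw [if_neg hz]
      constructor
      · intro h; exact Or.inr h
      · intro h; rcases h with h | h
        · exact absurd h hz
        · exact h
  have hfoff : ∀ r : Int, r ≠ ru → r ≠ rv → ∀ z : Int,
      ((if z = ru then rv else z) = r) ↔ (z = r) := by
    intro r h1 h2 z
    by_cases hz : z = ru
    · rw [if_pos hz]
      constructor
      · intro h; exact absurd h.symm h2
      · intro h; exact absurd (by omega : r = ru) h1
    · rw [if_neg hz]
  have hdisj : ∀ y ∈ rng a, ¬(G lab y = ru ∧ G lab y = rv) := by
    intro y _ hy; exact hne (by omega)
  refine ⟨⟨by simp [hB.llen], by simp [hB.tlen], hB.wlen, ?_, ?_⟩, hmap⟩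
  · intro x hx
    rw [hmap x hx]
    by_cases h : G lab x = ru
    · rw [if_pos h]; exact hrvNd
    · rw [if_neg h]; exact hB.lrng x hx
  · intro x hx
    rw [hmap x hx]
    have hcongr : ∀ r : Int, (rng a).filter (fun y =>
        G (lab.map (fun z => if z = ru then rv else z)) y = r)
        = (rng a).filter (fun y => (if G lab y = ru then rv else G lab y) = r) := by
      intro r
      apply filter_congr_dec
      intro y hy
      rw [hmap y ((mem_rng a y).mp hy)]
    by_cases h : G lab x = ru
    · rw [if_pos h]
      rw [G_set_self tot rv _ hrvlt]
      unfold gSum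
      rw [hcongr rv]
      rw [filter_congr_dec _ _ _ (fun y _ => hfrv (G lab y))]
      rw [filter_or_sum (rng a) _ _ _ hdisj]
      have e1 : G tot ru = gSum a w (fun y => G lab y) ru := by
        have := hB.tsum u0 hu; rw [← hru] at this; exact this
      have e2 : G tot rv = gSum a w (fun y => G lab y) rv := by
        have := hB.tsum v0 hv; rw [← hrv] at this; exact this
      rw [e1, e2]
      unfold gSum
      ring
    · rw [if_neg h]
      by_cases h2 : G lab x = rv
      · rw [h2]
        rw [G_set_self tot rv _ hrvlt]
        unfold gSum
        rw [hcongr rv]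
        rw [filter_congr_dec _ _ _ (fun y _ => hfrv (G lab y))]
        rw [filter_or_sum (rng a) _ _ _ hdisj]
        have e1 : G tot ru = gSum a w (fun y => G lab y) ru := by
          have := hB.tsum u0 hu; rw [← hru] at this; exact this
        have e2 : G tot rv = gSum a w (fun y => G lab y) rv := by
          have := hB.tsum v0 hv; rw [← hrv] at this; exact this
        rw [e1, e2]
        unfold gSum
        ring
      · rw [G_set_ne tot rv (G lab x) _ hrvNd.1 (hB.lrng x hx).1 h2]
        rw [hB.tsum x hx]
        unfold gSum
        rw [hcongr (G lab x)]
        rw [filter_congr_dec _ _ _ (fun y _ => hfoff (G lab x) h h2 (G lab y))]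

-- the partitions of A (via ρ) and B (via the label array) coincide
def Link (a : Int) (ρ : Int → Int) (lab : List Int) : Prop :=
  ∀ x y, Nd a x → Nd a y → (ρ x = ρ y ↔ G lab x = G lab y)

lemma link_step (a : Int) (ρ ρ' : Int → Int) (lab lab' : List Int) (u0 v0 rN : Int)
    (hL : Link a ρ lab) (hu : Nd a u0) (hv : Nd a v0)
    (hrN : rN = ρ u0 ∨ rN = ρ v0)
    (hρform : ∀ x, ρ' x = if ρ x = ρ u0 ∨ ρ x = ρ v0 then rN else ρ x)
    (hlform : ∀ x, Nd a x → G lab' x = if G lab x = G lab u0 then G lab v0 else G lab x) :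
    Link a ρ' lab' := by
  intro x y hx hy
  have hPQ : ∀ z, Nd a z →
      ((ρ z = ρ u0 ∨ ρ z = ρ v0) ↔ (G lab z = G lab u0 ∨ G lab z = G lab v0)) := by
    intro z hz
    constructor
    · intro h; rcases h with h | h
      · exact Or.inl ((hL z u0 hz hu).mp h)
      · exact Or.inr ((hL z v0 hz hv).mp h)
    · intro h; rcases h with h | h
      · exact Or.inl ((hL z u0 hz hu).mpr h)
      · exact Or.inr ((hL z v0 hz hv).mpr h)
  have hρrN : ∀ z, Nd a z → ¬(ρ z = ρ u0 ∨ ρ z = ρ v0) → ρ' z ≠ rN := by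
    intro z hz hin
    rw [hρform z, if_neg hin]
    intro h
    rcases hrN with h1 | h1
    · exact hin (Or.inl (h.trans h1))
    · exact hin (Or.inr (h.trans h1))
  have hlabrv : ∀ z, Nd a z → ¬(G lab z = G lab u0 ∨ G lab z = G lab v0) →
      G lab' z ≠ G lab v0 := by
    intro z hz hin
    rw [hlform z hz, if_neg (fun h => hin (Or.inl h))]
    intro h; exact hin (Or.inr h)
  have hlabon : ∀ z, Nd a z → (G lab z = G lab u0 ∨ G lab z = G lab v0) →
      G lab' z = G lab v0 := by
    intro z hz hin
    rw [hlform z hz]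
    rcases hin with h | h
    · rw [if_pos h]
    · by_cases h1 : G lab z = G lab u0
      · rw [if_pos h1]
      · rw [if_neg h1]; exact h
  have hρon : ∀ z, Nd a z → (ρ z = ρ u0 ∨ ρ z = ρ v0) → ρ' z = rN := by
    intro z hz hin; rw [hρform z, if_pos hin]
  by_cases hQx : G lab x = G lab u0 ∨ G lab x = G lab v0
  · have hPx : ρ x = ρ u0 ∨ ρ x = ρ v0 := (hPQ x hx).mpr hQx
    by_cases hQy : G lab y = G lab u0 ∨ G lab y = G lab v0
    · have hPy := (hPQ y hy).mpr hQy
      rw [hρon x hx hPx, hρon y hy hPy, hlabon x hx hQx, hlabon y hy hQy]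
      exact ⟨fun _ => rfl, fun _ => rfl⟩
    · have hPy : ¬(ρ y = ρ u0 ∨ ρ y = ρ v0) := fun h => hQy ((hPQ y hy).mp h)
      rw [hρon x hx hPx, hlabon x hx hQx]
      constructor
      · intro h; exact absurd h.symm (hρrN y hy hPy)
      · intro h; exact absurd h.symm (hlabrv y hy hQy)
  · have hPx : ¬(ρ x = ρ u0 ∨ ρ x = ρ v0) := fun h => hQx ((hPQ x hx).mp h)
    by_cases hQy : G lab y = G lab u0 ∨ G lab y = G lab v0
    · have hPy := (hPQ y hy).mpr hQy
      rw [hρon y hy hPy, hlabon y hy hQy]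
      constructor
      · intro h; exact absurd h (hρrN x hx hPx)
      · intro h; exact absurd h (hlabrv x hx hQx)
    · have hPy : ¬(ρ y = ρ u0 ∨ ρ y = ρ v0) := fun h => hQy ((hPQ y hy).mp h)
      rw [hρform x, if_neg hPx, hρform y, if_neg hPy,
          hlform x hx, if_neg (fun h => hQx (Or.inl h)),
          hlform y hy, if_neg (fun h => hQy (Or.inl h))]
      exact hL x y hx hy

def EInv (a : Int) (w : List Int) (stA : List Int × List Int × List Int)
    (stB : List Int × List Int) : Prop :=
  ∃ ρ dpt, InvA a w stA.1 stA.2.2 ρ dpt ∧ InvB a w stB.1 stB.2 ∧ Link a ρ stB.1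

-- the edge-processing loops of A and B preserve the joint invariant
lemma edges_spec (a : Int) (w : List Int) :
    ∀ (c : List (List Int)), (∀ e ∈ c, 2 ≤ e.length ∧ ∀ x ∈ e.take 2, -(a+1) ≤ x ∧ x ≤ a) →
    ∀ stA stB, EInv a w stA stB →
    EInv a w
      (c.foldl (fun st e => unionA st (PySem.List.pyGetD e 0 0) (PySem.List.pyGetD e 1 0)) stA)
      (c.foldl (fun (st : List Int × List Int) e =>
        let ru := PySem.List.pyGetD st.1 (PySem.List.pyGetD e 0 0) 0
        let rv := PySem.List.pyGetD st.1 (PySem.List.pyGetD e 1 0) 0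
        if ru ≠ rv then
          (st.1.map (fun x => if x = ru then rv else x),
           PySem.List.pySetD st.2 rv (PySem.List.pyGetD st.2 rv 0 + PySem.List.pyGetD st.2 ru 0))
        else st) stB) := by
  intro c
  induction c with
  | nil => intro _ stA stB h; exact h
  | cons e t ih =>
    intro hc stA stB h
    obtain ⟨ρ, dpt, hA, hB, hL⟩ := h
    obtain ⟨parent, size, str⟩ := stA
    obtain ⟨lab, tot⟩ := stB
    obtain ⟨hel, hee⟩ := hc e List.mem_cons_self
    rcases e with _ | ⟨x0, e'⟩
    · simp at hel
    rcases e' with _ | ⟨y0, erest⟩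
    · simp at hel
    obtain ⟨hx01, hx02⟩ := hee x0 (by simp)
    obtain ⟨hy01, hy02⟩ := hee y0 (by simp)
    have hu : Nd a (wrapN a x0) := wrapN_Nd a x0 hx01 hx02
    have hv : Nd a (wrapN a y0) := wrapN_Nd a y0 hy01 hy02
    have hg0 : PySem.List.pyGetD (x0 :: y0 :: erest) 0 0 = x0 := by
      rw [pyGetD_eq_G _ _ (by omega)]; simp [G]
    have hg1 : PySem.List.pyGetD (x0 :: y0 :: erest) 1 0 = y0 := by
      rw [pyGetD_eq_G _ _ (by omega)]; simp [G]
    have htc : ∀ e ∈ t, 2 ≤ e.length ∧ ∀ x ∈ e.take 2, -(a+1) ≤ x ∧ x ≤ a :=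
      fun e he => hc e (List.mem_cons_of_mem _ he)
    simp only [List.foldl_cons, hg0, hg1]
    rw [pyGetD_wrapN a lab x0 hB.llen hx01 hx02, pyGetD_wrapN a lab y0 hB.llen hy01 hy02]
    obtain ⟨ρ', dpt', rN, hrN, hIA', hρform⟩ :=
      unionA_spec a w ρ dpt parent size str x0 y0 hA hx01 hx02 hy01 hy02
    by_cases hbne : G lab (wrapN a x0) ≠ G lab (wrapN a y0)
    · rw [if_pos hbne]
      rw [pySetD_eq_set _ _ _ (hB.lrng _ hv).1,
          pyGetD_eq_G tot _ (hB.lrng _ hv).1, pyGetD_eq_G tot _ (hB.lrng _ hu).1]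
      obtain ⟨hIB', hlform⟩ := stepB_merge a w lab tot (wrapN a x0) (wrapN a y0) hB hu hv hbne
      exact ih htc _ _ ⟨ρ', dpt', hIA', hIB',
        link_step a ρ ρ' lab _ (wrapN a x0) (wrapN a y0) rN hL hu hv hrN hρform hlform⟩
    · rw [if_neg hbne]
      push_neg at hbne
      have hρeq : ρ (wrapN a x0) = ρ (wrapN a y0) := (hL _ _ hu hv).mpr hbne
      have hrN' : rN = ρ (wrapN a x0) := by
        rcases hrN with h | h
        · exact h
        · exact h.trans hρeq.symm
      have hfun : ρ' = ρ := by
        funext z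
        rw [hρform z]
        by_cases hin : ρ z = ρ (wrapN a x0) ∨ ρ z = ρ (wrapN a y0)
        · rw [if_pos hin, hrN']
          rcases hin with h | h
          · exact h.symm
          · rw [hρeq]; exact h.symm
        · rw [if_neg hin]
      rw [hfun] at hIA'
      exact ih htc _ _ ⟨ρ, dpt', hIA', hB, hL⟩

-- the two counting loops march in lockstep: same membership outcome, same increment
lemma count_spec (a d : Int) (w strF lab tot : List Int) (ρ : Int → Int) (dpt : Int → Nat)
    (hB : InvB a w lab tot) (hL : Link a ρ lab) :
    ∀ (l : List Int), (∀ i ∈ l, Nd a i) →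
    ∀ (parent : List Int) (vis seen : PySem.Set Int) (cnt : Int),
      InvA a w parent strF ρ dpt →
      (∀ x, Nd a x → (ρ x ∈ vis ↔ G lab x ∈ seen)) →
      (l.foldl (fun (acc : List Int × PySem.Set Int × Int) i =>
          let f := findSetA (acc.1.length + 1) acc.1 i
          if PySem.Set.contains acc.2.1 f.2 then
            (f.1, acc.2.1, acc.2.2 + (if (0 : Int) ≥ d then 1 else 0))
          else
            (f.1, PySem.Set.add acc.2.1 f.2,
             acc.2.2 + (if PySem.List.pyGetD strF f.2 0 ≥ d then 1 else 0)))
        (parent, vis, cnt)).2.2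
      = (l.foldl (fun (acc : PySem.Set Int × Int) i =>
          let r := PySem.List.pyGetD lab i 0
          if PySem.Set.contains acc.1 r then
            (acc.1, acc.2 + (if (0 : Int) ≥ d then 1 else 0))
          else
            (PySem.Set.add acc.1 r, acc.2 + (if PySem.List.pyGetD tot r 0 ≥ d then 1 else 0)))
        (seen, cnt)).2 := by
  intro l
  induction l with
  | nil => intro _ parent vis seen cnt _ _; rfl
  | cons i t ih =>
    intro hl parent vis seen cnt hIA hvs
    have hi : Nd a i := hl i List.mem_cons_self
    have ht : ∀ j ∈ t, Nd a j := fun j hj => hl j (List.mem_cons_of_mem _ hj)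
    have hfl : dpt i < parent.length + 1 := by
      have h1 := hIA.dbnd i hi
      have h2 := cCard_le a ρ (ρ i)
      rw [hIA.plen]; omega
    obtain ⟨he, hIA', _⟩ := findA_spec a w strF ρ dpt (parent.length+1) parent i hIA hi hfl
    have hρiNd : Nd a (ρ i) := (hIA.rroot i hi).1
    have hlabiNd : Nd a (G lab i) := hB.lrng i hi
    simp only [List.foldl_cons, he, pyGetD_eq_G lab i hi.1]
    by_cases hin : ρ i ∈ vis
    · have e1 : PySem.Set.contains vis (ρ i) = true := (PySem.Set.contains_iff vis (ρ i)).mpr hin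
      have e2 : PySem.Set.contains seen (G lab i) = true :=
        (PySem.Set.contains_iff seen (G lab i)).mpr ((hvs i hi).mp hin)
      rw [e1, e2]
      rw [if_pos rfl, if_pos rfl]
      exact ih ht _ vis seen _ hIA' hvs
    · have e1 : PySem.Set.contains vis (ρ i) = false := by
        rw [← Bool.not_eq_true, PySem.Set.contains_iff]; exact hin
      have e2 : PySem.Set.contains seen (G lab i) = false := by
        rw [← Bool.not_eq_true, PySem.Set.contains_iff]
        exact fun h => hin ((hvs i hi).mpr h)
      rw [e1, e2]
      simp only [Bool.false_eq_true, if_false]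
      have hval : PySem.List.pyGetD strF (ρ i) 0 = PySem.List.pyGetD tot (G lab i) 0 := by
        rw [pyGetD_eq_G strF _ hρiNd.1, pyGetD_eq_G tot _ hlabiNd.1]
        rw [hIA.ssum (ρ i) hρiNd (hIA.rroot i hi).2, hB.tsum i hi]
        have hρρ : ρ (ρ i) = ρ i := hIA.ρ_idem i hi
        have hcongr : (rng a).filter (fun y => ρ y = ρ i)
            = (rng a).filter (fun y => G lab y = G lab i) :=
          filter_congr_dec _ _ _ (fun y hy => hL y i ((mem_rng a y).mp hy) hi)
        unfold gSum
        rw [hcongr]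
      rw [hval]
      apply ih ht _ _ _ _ hIA'
      intro x hx
      rw [PySem.Set.mem_add, PySem.Set.mem_add]
      constructor
      · intro h; rcases h with h | h
        · exact Or.inl ((hvs x hx).mp h)
        · exact Or.inr ((hL x i hx hi).mp h)
      · intro h; rcases h with h | h
        · exact Or.inl ((hvs x hx).mpr h)
        · exact Or.inr ((hL x i hx hi).mpr h)

lemma init_InvA (a : Int) (w : List Int) (hw : (a+1).toNat ≤ w.length) :
    InvA a w (rng a) w (fun x => x) (fun _ => 0) := by
  refine ⟨length_rng a, rfl, hw, ?_, ?_, ?_, ?_, ?_, ?_⟩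
  · intro v hv; rw [G_rng a v hv]; exact hv
  · intro v _ _; rfl
  · intro v hv hne; exact absurd (G_rng a v hv) hne
  · intro v hv; exact ⟨hv, G_rng a v hv⟩
  · intro v hv
    unfold cCard
    rw [filter_eq_singleton (rng a) v (nodup_rng a) ((mem_rng a v).mpr hv)]
    simp
  · intro r hr _
    unfold gSum
    rw [filter_eq_singleton (rng a) r (nodup_rng a) ((mem_rng a r).mpr hr)]
    simp

lemma init_InvB (a : Int) (w : List Int) (hw : (a+1).toNat ≤ w.length) :
    InvB a w (rng a) w := by
  refine ⟨length_rng a, rfl, hw, ?_, ?_⟩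
  · intro x hx; rw [G_rng a x hx]; exact hx
  · intro x hx
    rw [G_rng a x hx]
    have hcongr : (rng a).filter (fun y => G (rng a) y = x) = (rng a).filter (fun y => y = x) := by
      apply filter_congr_dec
      intro y hy
      rw [G_rng a y ((mem_rng a y).mp hy)]
    unfold gSum
    rw [hcongr, filter_eq_singleton (rng a) x (nodup_rng a) ((mem_rng a x).mpr hx)]
    simp

lemma init_Link (a : Int) : Link a (fun x => x) (rng a) := by
  intro x y hx hy
  rw [G_rng a x hx, G_rng a y hy]

-- ===== VERDICT (by name: the statement is the Claim_ definition above) =====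
theorem solve_spec : Claim_equal_solve := by
  intro a b c d _ hpre
  obtain ⟨hac, hab, hc⟩ := hpre
  unfold Spec_solve
  by_cases ha : 0 ≤ a
  · have hw : ((a:Int)+1).toNat ≤ (0 :: b : List Int).length := by
      simp only [List.length_cons]; omega
    obtain ⟨ρ, dpt, hIA, hIB, hL⟩ :=
      edges_spec a (0 :: b) c hc
        (PySem.List.pyRange 0 (a+1) 1, (PySem.List.pyRange 0 (a+1) 1).map (fun _ => (1 : Int)),
          (0 :: b : List Int))
        (PySem.List.pyRange 0 (a+1) 1, (0 :: b : List Int))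
        ⟨fun x => x, fun _ => 0, init_InvA a (0 :: b) hw, init_InvB a (0 :: b) hw, init_Link a⟩
    have hmem : ∀ i ∈ PySem.List.pyRange 1 (a+1) 1, Nd a i := by
      intro i hi
      rw [PySem.List.mem_pyRange_one] at hi
      exact ⟨by omega, by omega⟩
    have hinit : ∀ x, Nd a x → (ρ x ∈ (PySem.Set.empty : PySem.Set Int) ↔
        G (c.foldl (fun (st : List Int × List Int) e =>
            let ru := PySem.List.pyGetD st.1 (PySem.List.pyGetD e 0 0) 0
            let rv := PySem.List.pyGetD st.1 (PySem.List.pyGetD e 1 0) 0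
            if ru ≠ rv then
              (st.1.map (fun x => if x = ru then rv else x),
               PySem.List.pySetD st.2 rv (PySem.List.pyGetD st.2 rv 0 + PySem.List.pyGetD st.2 ru 0))
            else st) (PySem.List.pyRange 0 (a+1) 1, (0 :: b : List Int))).1 x
          ∈ (PySem.Set.empty : PySem.Set Int)) := by
      intro x _
      constructor
      · intro h; exact absurd h (by simp [PySem.Set.empty])
      · intro h; exact absurd h (by simp [PySem.Set.empty])
    simp only [solve, solve_alt]
    exact count_spec a d (0 :: b) _ _ _ ρ dpt hIB hL
      (PySem.List.pyRange 1 (a+1) 1) hmem _ PySem.Set.empty PySem.Set.empty 0 hIA hinit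
  · rcases hac with h0 | h0
    · exact absurd h0 ha
    · subst h0
      simp [solve, solve_alt, PySem.List.pyRange_one_eq_nil (show a+1 ≤ 1 by omega)]
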